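-- pv_equiv track=rewrite | github.com/daniel-reich/ubiquitous-fiesta | vudQZFD64nDWkKz8a_4.py | grant_the_hint
-- ===== SOURCE A (Python) =====
-- def grant_the_hint(txt):
--   s=[]
--   for k in range(-1, max([len(i) for i in txt.split()])):
--     l=[]
--     for i in txt.split():
--       d=""
--       for j in range(len(i)):
--         if j > k:
--           d+='_'
--         else:
--           d+=i[j]
--       l.append(d)
--     s.append(" ".join(l))
--   return s
-- ===== SOURCE B (Python) =====
-- def grant_the_hint(txt):
--     words = txt.split()
--     maxlen = max(len(w) for w in words)
--     current = ['_' * len(w) for w in words]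
--     out = [' '.join(current)]
--     for k in range(maxlen):
--         current = [c[:k] + w[k] + c[k + 1:] if k < len(w) else c
--                    for w, c in zip(words, current)]
--         out.append(' '.join(current))
--     return out
-- ===== Notes on version B (the rewrite author's own statement) =====
-- stated objective: faster
-- what changed: B derives each hint line from the previous state by revealing one character per word per level, splits txt once, and builds words by slicing, instead of A's re-splitting txt at every level and rebuilding every word character-by-character with += at every level.
import Mathlib
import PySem

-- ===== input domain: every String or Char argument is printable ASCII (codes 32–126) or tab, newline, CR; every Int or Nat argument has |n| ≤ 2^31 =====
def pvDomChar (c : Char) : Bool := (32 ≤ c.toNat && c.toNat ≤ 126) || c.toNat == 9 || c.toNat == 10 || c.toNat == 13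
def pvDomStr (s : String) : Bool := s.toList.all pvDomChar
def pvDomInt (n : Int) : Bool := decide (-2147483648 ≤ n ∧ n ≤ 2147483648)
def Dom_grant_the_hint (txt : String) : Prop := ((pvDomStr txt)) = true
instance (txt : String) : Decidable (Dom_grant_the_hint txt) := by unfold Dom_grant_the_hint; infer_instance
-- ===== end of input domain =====

-- B replaces A's per-level per-word char-by-char rebuild by a state update: each hint line is
-- derived from the previous line by revealing one more character per word; txt is split once (objective: faster, measured).

-- ===== PORT A =====
-- A rebuilds every word at every level k from scratch, one character at a time.
def grant_the_hint (txt : String) : List String :=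
  match PySem.List.max? (((PySem.Str.split₀ txt).map String.toList).map List.length) id with
  | none => []   -- Python raises ValueError here (max of empty list, txt has no words); excluded by Pre_
  | some mx =>
    (PySem.List.pyRange (-1) (mx : Int) 1).foldl (fun s k =>
      let l := ((PySem.Str.split₀ txt).map String.toList).foldl (fun l i =>
        let d := (PySem.List.pyRange 0 (i.length : Int) 1).foldl (fun d j =>
          if j > k then d ++ ['_'] else d ++ [PySem.List.pyGetD i j '_']) []
        l ++ [d]) []
      s ++ [String.ofList (PySem.Chars.join [' '] l)]) []

-- ===== PORT B =====
-- B keeps the current (partially revealed) words as state and reveals position k in pass k.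
-- Slices c[:k], c[k+1:] are take/drop; w[k] is in range under the guard, so getD is exact.
def grant_the_hint_alt (txt : String) : List String :=
  let ws := (PySem.Str.split₀ txt).map String.toList
  match PySem.List.max? (ws.map List.length) id with
  | none => []   -- Python raises ValueError here (max of an empty generator); excluded by Pre_
  | some mx =>
    let current := ws.map (fun w => List.replicate w.length '_')
    ((List.range mx).foldl (fun st k =>
        let cur := (ws.zip st.1).map (fun p =>
          if k < p.1.length then p.2.take k ++ [p.1.getD k '_'] ++ p.2.drop (k+1) else p.2)
        (cur, st.2 ++ [String.ofList (PySem.Chars.join [' '] cur)]))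
      (current, [String.ofList (PySem.Chars.join [' '] current)])).2

-- ===== PRECONDITION & SPEC =====
-- Both A and B raise ValueError (max of an empty sequence) when txt contains no words; Pre_ excludes exactly those inputs.
def Pre_grant_the_hint (txt : String) : Prop := PySem.Str.split₀ txt ≠ []
instance (txt : String) : Decidable (Pre_grant_the_hint txt) := by unfold Pre_grant_the_hint; infer_instance
def pvWitness_grant_the_hint : String := "hi you"
def Spec_grant_the_hint (txt : String) (out : List String) : Prop := out = grant_the_hint_alt txt
instance (txt : String) (out : List String) : Decidable (Spec_grant_the_hint txt out) := by unfold Spec_grant_the_hint; infer_instance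

-- ===== CLAIM (what is proved, stated in full; the proofs are below) =====
def Claim_equal_grant_the_hint : Prop := ∀ (txt : String), Dom_grant_the_hint txt → Pre_grant_the_hint txt → Spec_grant_the_hint txt (grant_the_hint txt)

-- ===== LEMMAS AND PROOFS =====

-- the hint form of word w at level n: the first n characters revealed, the rest underscores
def hintReveal (n : Nat) (w : List Char) : List Char :=
  w.take n ++ List.replicate (w.length - n) '_'

def hintLine (ws : List (List Char)) (n : Nat) : String :=
  String.ofList (PySem.Chars.join [' '] (ws.map (hintReveal n)))

lemma getElem_hintReveal (n : Nat) (w : List Char) (i : Nat) (h : i < w.length)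
    {h' : i < (hintReveal n w).length} :
    (hintReveal n w)[i] = if i < n then w[i] else '_' := by
  unfold hintReveal
  by_cases hi : i < (List.take n w).length
  · rw [List.getElem_append_left hi, List.getElem_take, if_pos (by simp at hi; omega)]
  · rw [List.getElem_append_right (Nat.le_of_not_lt hi), List.getElem_replicate,
      if_neg (by simp at hi; omega)]

-- A's inner character loop at level k builds exactly the hint form at level (k+1).toNat
lemma A_word (k : Int) (hk : -1 ≤ k) (w : List Char) :
    (PySem.List.pyRange 0 (w.length : Int) 1).foldl (fun d j =>
      if j > k then d ++ ['_'] else d ++ [PySem.List.pyGetD w j '_']) []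
    = hintReveal (k + 1).toNat w := by
  have hfun : (fun (d : List Char) (j : Int) => if j > k then d ++ ['_'] else d ++ [PySem.List.pyGetD w j '_'])
      = fun d j => d ++ [if j > k then '_' else PySem.List.pyGetD w j '_'] := by
    funext d j; split <;> rfl
  rw [hfun, PySem.List.foldl_append_singleton_eq_map, PySem.List.pyRange_one]
  apply List.ext_getElem
  · simp [hintReveal]; omega
  · intro i h1 h2
    simp only [List.nil_append, List.map_map, List.getElem_map, List.getElem_range,
      Function.comp_apply, zero_add, PySem.List.pyGetD_natCast]
    simp only [List.nil_append, List.length_map, List.length_range] at h1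
    rw [getElem_hintReveal _ _ _ h1, List.getD_eq_getElem _ _ h1]
    by_cases hgt : (i : Int) > k
    · rw [if_pos hgt, if_neg (by omega)]
    · rw [if_neg hgt, if_pos (by omega)]

-- one B update step on a level-k state yields the level-(k+1) state
lemma reveal_step (k : Nat) (w : List Char) :
    (if k < w.length then (hintReveal k w).take k ++ [w.getD k '_'] ++ (hintReveal k w).drop (k + 1)
     else hintReveal k w) = hintReveal (k + 1) w := by
  by_cases h : k < w.length
  · rw [if_pos h]
    have hlen : (List.take k w).length = k := by simp; omega
    unfold hintReveal
    rw [List.take_left' hlen, ← List.drop_drop, List.drop_left' hlen, List.drop_replicate,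
      List.getD_eq_getElem _ _ h, List.take_add_one, List.getElem?_eq_getElem h]
    simp [Nat.sub_sub]
  · rw [if_neg h]
    unfold hintReveal
    rw [List.take_of_length_le (by omega), List.take_of_length_le (by omega)]
    simp [show w.length - k = 0 by omega, show w.length - (k + 1) = 0 by omega]

lemma B_step (ws : List (List Char)) (k : Nat) :
    (ws.zip (ws.map (hintReveal k))).map (fun p =>
      if k < p.1.length then p.2.take k ++ [p.1.getD k '_'] ++ p.2.drop (k + 1) else p.2)
    = ws.map (hintReveal (k + 1)) := by
  induction ws with
  | nil => rfl
  | cons w ws ih =>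
    simp only [List.map_cons, List.zip_cons_cons, ih, List.cons.injEq, and_true]
    exact reveal_step k w

lemma B_loop (ws : List (List Char)) : ∀ (n a : Nat) (acc : List String),
    ((List.range' a n).foldl (fun st k =>
        let cur := (ws.zip st.1).map (fun p =>
          if k < p.1.length then p.2.take k ++ [p.1.getD k '_'] ++ p.2.drop (k + 1) else p.2)
        (cur, st.2 ++ [String.ofList (PySem.Chars.join [' '] cur)]))
      (ws.map (hintReveal a), acc)).2
    = acc ++ (List.range' a n).map (fun k => hintLine ws (k + 1)) := by
  intro n
  induction n with
  | zero => simp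
  | succ n ih =>
    intro a acc
    rw [List.range'_succ, List.foldl_cons, List.map_cons]
    simp only [B_step]
    rw [ih (a + 1) (acc ++ [String.ofList (PySem.Chars.join [' '] (ws.map (hintReveal (a + 1))))])]
    simp [hintLine]

-- ===== VERDICT (by name: the statement is the Claim_ definition above) =====
theorem grant_the_hint_spec : Claim_equal_grant_the_hint := by
  intro txt _ hpre
  unfold Spec_grant_the_hint grant_the_hint grant_the_hint_alt
  set ws := (PySem.Str.split₀ txt).map String.toList with hws
  rcases hmx : PySem.List.max? (ws.map List.length) id with _ | mx
  · simp only [hmx]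
  · -- A side
    have hA : (PySem.List.pyRange (-1) (mx : Int) 1).foldl (fun s k =>
        let l := ws.foldl (fun l i =>
          let d := (PySem.List.pyRange 0 (i.length : Int) 1).foldl (fun d j =>
            if j > k then d ++ ['_'] else d ++ [PySem.List.pyGetD i j '_']) []
          l ++ [d]) []
        s ++ [String.ofList (PySem.Chars.join [' '] l)]) []
        = (List.range (mx + 1)).map (fun j => hintLine ws j) := by
      rw [PySem.List.foldl_append_singleton_eq_map, List.nil_append]
      have hrng : ((mx : Int) - (-1)).toNat = mx + 1 := by omega
      rw [PySem.List.pyRange_one, hrng, List.map_map]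
      apply List.map_congr_left
      intro j hj
      simp only [Function.comp_apply]
      rw [PySem.List.foldl_append_singleton_eq_map, List.nil_append]
      have : ∀ i ∈ ws, (PySem.List.pyRange 0 (i.length : Int) 1).foldl (fun d k =>
          if k > (-1 + (j : Int)) then d ++ ['_'] else d ++ [PySem.List.pyGetD i k '_']) []
          = hintReveal j i := by
        intro i _
        rw [A_word (-1 + (j : Int)) (by omega) i]
        congr 1; omega
      rw [List.map_congr_left this]
      rfl
    -- B side
    have hB : ((List.range mx).foldl (fun st k =>
        let cur := (ws.zip st.1).map (fun p =>
          if k < p.1.length then p.2.take k ++ [p.1.getD k '_'] ++ p.2.drop (k + 1) else p.2)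
        (cur, st.2 ++ [String.ofList (PySem.Chars.join [' '] cur)]))
      (ws.map (fun w => List.replicate w.length '_'),
        [String.ofList (PySem.Chars.join [' '] (ws.map (fun w => List.replicate w.length '_')))])).2
        = (List.range (mx + 1)).map (fun j => hintLine ws j) := by
      have h0 : (ws.map (fun w => List.replicate w.length '_')) = ws.map (hintReveal 0) := by
        apply List.map_congr_left; intro w _; simp [hintReveal]
      rw [h0, List.range_eq_range', B_loop ws mx 0 [String.ofList (PySem.Chars.join [' '] (ws.map (hintReveal 0)))]]
      rw [List.range_succ_eq_map, List.map_cons, List.map_map, ← List.range_eq_range']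
      simp only [List.singleton_append, hintLine, List.map_map, Function.comp_def,
        Nat.succ_eq_add_one, hws]
    simp only [hmx, hA, hB]
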